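-- pv_equiv track=rewrite | github.com/Sana-ai-coder/Elevate | backend/adaptive_engine.py | difficulty_fallback_sequence
-- ===== SOURCE A (Python) =====
-- DIFFICULTY_ORDER = ["easy", "medium", "hard", "expert"]
--
-- def _difficulty_rank(level: str | None) -> int:
--     level = (level or "medium").lower()
--     return DIFFICULTY_ORDER.index(level) if level in DIFFICULTY_ORDER else 1
--
-- def difficulty_fallback_sequence(target: str | None) -> list[str]:
--     """Return nearest-neighbor difficulty fallback order."""
--     rank = _difficulty_rank(target)
--     offsets = [0, -1, 1, -2, 2, -3, 3]
--     sequence = []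
--     for offset in offsets:
--         candidate_rank = rank + offset
--         if 0 <= candidate_rank < len(DIFFICULTY_ORDER):
--             level = DIFFICULTY_ORDER[candidate_rank]
--             if level not in sequence:
--                 sequence.append(level)
--     return sequence
-- ===== SOURCE B (Python) =====
-- DIFFICULTY_ORDER = ["easy", "medium", "hard", "expert"]
--
-- def _difficulty_rank(level):
--     level = (level or "medium").lower()
--     return DIFFICULTY_ORDER.index(level) if level in DIFFICULTY_ORDER else 1
--
-- def difficulty_fallback_sequence(target):
--     """Return nearest-neighbor difficulty fallback order."""
--     rank = _difficulty_rank(target)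
--     return sorted(DIFFICULTY_ORDER, key=lambda lvl: abs(DIFFICULTY_ORDER.index(lvl) - rank))
-- ===== Notes on version B (the rewrite author's own statement) =====
-- stated objective: simpler
-- what changed: Replaces A's explicit offset list, range guard and membership-dedup loop with one stable sort of DIFFICULTY_ORDER keyed on absolute distance to the target rank; stability reproduces the easier-first tie-break.
import Mathlib
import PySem

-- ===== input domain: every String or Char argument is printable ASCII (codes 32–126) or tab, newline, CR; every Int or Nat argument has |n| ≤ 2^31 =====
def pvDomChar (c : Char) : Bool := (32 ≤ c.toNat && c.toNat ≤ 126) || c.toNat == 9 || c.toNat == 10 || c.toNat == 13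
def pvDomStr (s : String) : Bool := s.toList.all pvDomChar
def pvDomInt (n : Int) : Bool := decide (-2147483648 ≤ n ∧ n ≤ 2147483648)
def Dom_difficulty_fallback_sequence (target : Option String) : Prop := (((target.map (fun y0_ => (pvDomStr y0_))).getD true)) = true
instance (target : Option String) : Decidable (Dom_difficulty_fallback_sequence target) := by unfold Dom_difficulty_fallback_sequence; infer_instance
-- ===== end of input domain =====

-- B replaces A's explicit offset list, range guard and dedup loop by one stable sort of
-- DIFFICULTY_ORDER keyed on distance to the target rank (objective: simpler).

-- ===== PORT A =====
def DIFFICULTY_ORDER : List String := ["easy", "medium", "hard", "expert"]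

-- shared helper of both Pythons: (level or "medium").lower(), index if member else 1
def pvRank (level : Option String) : Int :=
  let lv := PySem.Str.lower (match level with
    | none => "medium"
    | some s => if s = "" then "medium" else s)
  if lv ∈ DIFFICULTY_ORDER then ((PySem.List.index? DIFFICULTY_ORDER lv).getD 0 : Nat) else 1

-- the for-loop over offsets, with rank already computed
def pvLoopA (rank : Int) : List String :=
  ([0, -1, 1, -2, 2, -3, 3] : List Int).foldl (fun seq offset =>
    let candidate_rank := rank + offset
    if 0 ≤ candidate_rank ∧ candidate_rank < PySem.List.len DIFFICULTY_ORDER then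
      let level := PySem.List.pyGetD DIFFICULTY_ORDER candidate_rank ""
      if level ∈ seq then seq else seq ++ [level]
    else seq) []

def difficulty_fallback_sequence (target : Option String) : List String :=
  pvLoopA (pvRank target)

-- ===== PORT B =====
def pvSortB (rank : Int) : List String :=
  PySem.List.sorted DIFFICULTY_ORDER
    (fun lvl => |(((PySem.List.index? DIFFICULTY_ORDER lvl).getD 0 : Nat) : Int) - rank|) false

def difficulty_fallback_sequence_alt (target : Option String) : List String :=
  pvSortB (pvRank target)

-- ===== PRECONDITION & SPEC =====
def Spec_difficulty_fallback_sequence (target : Option String) (out : List String) : Prop := out = difficulty_fallback_sequence_alt target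
instance (target : Option String) (out : List String) : Decidable (Spec_difficulty_fallback_sequence target out) := by unfold Spec_difficulty_fallback_sequence; infer_instance

-- ===== CLAIM (what is proved, stated in full; the proofs are below) =====
def Claim_equal_difficulty_fallback_sequence : Prop := ∀ (target : Option String), Dom_difficulty_fallback_sequence target → Spec_difficulty_fallback_sequence target (difficulty_fallback_sequence target)

-- ===== LEMMAS AND PROOFS =====
theorem pvRankIf_cases (lv : String) :
    (if lv ∈ DIFFICULTY_ORDER then (((PySem.List.index? DIFFICULTY_ORDER lv).getD 0 : Nat) : Int) else 1) = 0 ∨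
    (if lv ∈ DIFFICULTY_ORDER then (((PySem.List.index? DIFFICULTY_ORDER lv).getD 0 : Nat) : Int) else 1) = 1 ∨
    (if lv ∈ DIFFICULTY_ORDER then (((PySem.List.index? DIFFICULTY_ORDER lv).getD 0 : Nat) : Int) else 1) = 2 ∨
    (if lv ∈ DIFFICULTY_ORDER then (((PySem.List.index? DIFFICULTY_ORDER lv).getD 0 : Nat) : Int) else 1) = 3 := by
  by_cases h : lv ∈ DIFFICULTY_ORDER
  · have h' := h
    simp only [DIFFICULTY_ORDER, List.mem_cons, List.not_mem_nil, or_false] at h'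
    rcases h' with h' | h' | h' | h' <;> subst h' <;> simp [DIFFICULTY_ORDER] <;> decide
  · simp [h]

theorem pvRank_cases (target : Option String) :
    pvRank target = 0 ∨ pvRank target = 1 ∨ pvRank target = 2 ∨ pvRank target = 3 := by
  unfold pvRank
  exact pvRankIf_cases _

theorem pvLoop_eq_sort (r : Int) (h : r = 0 ∨ r = 1 ∨ r = 2 ∨ r = 3) :
    pvLoopA r = pvSortB r := by
  rcases h with h | h | h | h <;> subst h <;> decide

-- ===== VERDICT (by name: the statement is the Claim_ definition above) =====
theorem difficulty_fallback_sequence_spec : Claim_equal_difficulty_fallback_sequence := by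
  intro target _
  unfold Spec_difficulty_fallback_sequence difficulty_fallback_sequence difficulty_fallback_sequence_alt
  exact pvLoop_eq_sort _ (pvRank_cases target)
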